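-- pv_equiv track=rewrite | github.com/SomilKSharma/AdvancedDSA | Hashing/freq.py | solve
-- ===== SOURCE A (Python) =====
-- def solve(A, B):
--
--     #create a hashmap
--     hashmap={}
--     for value in A:
--         hashmap[value]=hashmap.get(value,0)+1
--
--     #get an answer array
--     answer=[]
--
--     #iterate for each value in array B
--     for value in B:
--         answer.append(hashmap.get(value,0))
--
--     #return the answer
--     return answer
-- ===== SOURCE B (Python) =====
-- import bisect
--
-- def solve(A, B):
--     S = sorted(A)
--     return [bisect.bisect_right(S, v) - bisect.bisect_left(S, v) for v in B]
-- ===== Notes on version B (the rewrite author's own statement) =====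
-- stated objective: alternative
-- what changed: Replaces the frequency hashmap with a sorted copy of A; each query is answered as bisect_right - bisect_left over the run of equal elements instead of a dict lookup.
import Mathlib
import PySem

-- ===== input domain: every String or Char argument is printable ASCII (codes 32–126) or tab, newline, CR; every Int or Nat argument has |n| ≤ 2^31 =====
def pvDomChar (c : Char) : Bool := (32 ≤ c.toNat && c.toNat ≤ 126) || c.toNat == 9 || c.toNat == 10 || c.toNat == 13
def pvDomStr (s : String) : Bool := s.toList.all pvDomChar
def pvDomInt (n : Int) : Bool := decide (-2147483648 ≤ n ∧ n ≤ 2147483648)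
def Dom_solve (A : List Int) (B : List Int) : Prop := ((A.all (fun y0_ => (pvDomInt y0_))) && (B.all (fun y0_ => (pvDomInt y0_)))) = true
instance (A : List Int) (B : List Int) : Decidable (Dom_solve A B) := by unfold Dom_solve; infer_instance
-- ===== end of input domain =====

-- B keeps a sorted copy of A and answers each query with bisect_right - bisect_left
-- instead of A's frequency hashmap; equal values, different data structure.

-- ===== PORT A =====
def solve (A : List Int) (B : List Int) : List Int :=
  let hashmap := A.foldl (fun d value => d.insert value (d.getD value 0 + 1))
      (PySem.Dict.empty : PySem.Dict Int Int)
  B.foldl (fun answer value => answer ++ [hashmap.getD value 0]) []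

-- ===== PORT B =====
def solve_alt (A : List Int) (B : List Int) : List Int :=
  let S := PySem.List.sorted A (fun x => x) false
  B.map (fun v => ((PySem.List.bisectRight S v : Int) - (PySem.List.bisectLeft S v : Int)))

-- ===== PRECONDITION & SPEC =====
def Spec_solve (A : List Int) (B : List Int) (out : List Int) : Prop := out = solve_alt A B
instance (A : List Int) (B : List Int) (out : List Int) : Decidable (Spec_solve A B out) := by unfold Spec_solve; infer_instance

-- ===== CLAIM (what is proved, stated in full; the proofs are below) =====
def Claim_equal_solve : Prop := ∀ (A : List Int) (B : List Int), Dom_solve A B → Spec_solve A B (solve A B)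

-- ===== LEMMAS AND PROOFS =====

-- a predicate holding exactly on the first k positions has countP = k
theorem countP_eq_of_split (xs : List Int) (p : Int → Bool) (k : Nat)
    (hk : k ≤ xs.length)
    (h1 : ∀ (j : Nat) (hj : j < xs.length), j < k → p xs[j])
    (h2 : ∀ (j : Nat) (hj : j < xs.length), k ≤ j → ¬ p xs[j]) :
    xs.countP p = k := by
  have hsplit : xs = xs.take k ++ xs.drop k := (List.take_append_drop k xs).symm
  have htake : (xs.take k).countP p = (xs.take k).length := by
    rw [List.countP_eq_length]
    intro a ha
    obtain ⟨j, hj, rfl⟩ := List.mem_iff_getElem.mp ha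
    have hjlt : j < k := lt_of_lt_of_le hj (by simp [List.length_take])
    have hjx : j < xs.length := lt_of_lt_of_le hjlt hk
    have := h1 j hjx hjlt
    simpa [List.getElem_take] using this
  have hdrop : (xs.drop k).countP p = 0 := by
    rw [List.countP_eq_zero]
    intro a ha
    obtain ⟨j, hj, rfl⟩ := List.mem_iff_getElem.mp ha
    have hjx : k + j < xs.length := by
      have := hj; simp [List.length_drop] at this; omega
    have := h2 (k + j) hjx (by omega)
    simpa [List.getElem_drop] using this
  calc xs.countP p = (xs.take k ++ xs.drop k).countP p := by rw [← hsplit]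
    _ = (xs.take k).countP p + (xs.drop k).countP p := List.countP_append ..
    _ = k := by rw [htake, hdrop]; simp [List.length_take]; omega

theorem bisectLeft_eq_countP (xs : List Int) (v : Int)
    (hs : xs.Pairwise (fun a b => a ≤ b)) :
    PySem.List.bisectLeft xs v = xs.countP (fun x => decide (x < v)) := by
  obtain ⟨hk, h1, h2⟩ := PySem.List.bisectLeft_spec xs v hs
  exact (countP_eq_of_split xs _ _ hk
    (fun j hj hjk => by simpa using h1 j hj hjk)
    (fun j hj hkj => by simpa using h2 j hj hkj)).symm

theorem bisectRight_eq_countP (xs : List Int) (v : Int)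
    (hs : xs.Pairwise (fun a b => a ≤ b)) :
    PySem.List.bisectRight xs v = xs.countP (fun x => decide (x ≤ v)) := by
  obtain ⟨hk, h1, h2⟩ := PySem.List.bisectRight_spec xs v hs
  exact (countP_eq_of_split xs _ _ hk
    (fun j hj hjk => by simpa using h1 j hj hjk)
    (fun j hj hkj => by simpa [not_le] using h2 j hj hkj)).symm

theorem countP_le_split (xs : List Int) (v : Int) :
    xs.countP (fun x => decide (x ≤ v)) =
      xs.countP (fun x => decide (x < v)) + xs.count v := by
  induction xs with
  | nil => simp
  | cons x xs ih =>
    by_cases h : x = v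
    · subst h
      simp [ih]
      omega
    · rcases lt_or_ge x v with h' | h'
      · simp [ih, h, h', le_of_lt h']
        omega
      · have hnlt : ¬ x < v := not_lt.mpr h'
        have hnle : ¬ x ≤ v := fun hle => h (le_antisymm hle h')
        simp [ih, h, hnlt, hnle]

theorem per_query (A : List Int) (v : Int) :
    ((A.foldl (fun d value => d.insert value (d.getD value 0 + 1))
        (PySem.Dict.empty : PySem.Dict Int Int)).getD v 0) =
      ((PySem.List.bisectRight (PySem.List.sorted A (fun x => x) false) v : Int)
        - (PySem.List.bisectLeft (PySem.List.sorted A (fun x => x) false) v : Int)) := by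
  set S := PySem.List.sorted A (fun x => x) false with hS
  have hsorted : S.Pairwise (fun a b => a ≤ b) := by
    simpa using PySem.List.sorted_pairwise A (fun x => x)
  have hperm : S.Perm A := PySem.List.sorted_perm A (fun x => x) false
  have hcount : S.count v = A.count v := hperm.count_eq v
  have hgetD : (A.foldl (fun d value => d.insert value (d.getD value 0 + 1))
      (PySem.Dict.empty : PySem.Dict Int Int)).getD v 0 = (A.count v : Int) := by
    simpa using PySem.Dict.getD_foldl_insert_add_one A
      (PySem.Dict.empty : PySem.Dict Int Int) v
  rw [hgetD, bisectLeft_eq_countP S v hsorted, bisectRight_eq_countP S v hsorted,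
    countP_le_split S v, ← hcount]
  push_cast
  ring

-- ===== VERDICT (by name: the statement is the Claim_ definition above) =====
theorem solve_spec : Claim_equal_solve := by
  intro A B _
  unfold Spec_solve solve solve_alt
  have hfold : ∀ (f : Int → Int),
      B.foldl (fun answer value => answer ++ [f value]) [] = B.map f := by
    intro f
    simpa using PySem.List.foldl_append_singleton_eq_map f B ([] : List Int)
  simp only []
  rw [hfold (fun value =>
    (A.foldl (fun d value => d.insert value (d.getD value 0 + 1))
      (PySem.Dict.empty : PySem.Dict Int Int)).getD value 0)]
  apply List.map_congr_left
  intro v _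
  exact per_query A v
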